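-- pv_equiv track=rewrite | github.com/pypi-data/pypi-mirror-356 | packages/exf2mbfxml/exf2mbfxml-0.1.2-py3-none-any.whl/exf2mbfxml/analysis.py | _update_grouped_nodes
-- ===== SOURCE A (Python) =====
-- def _update_grouped_nodes(grouped_nodes, group_start_nodes, plant_set):
--     used_tuples = set()
--
--     modified = False
--     for start_node in group_start_nodes:
--         first, second = start_node
--         for key, node_set in grouped_nodes.items():
--             if first in node_set and second in node_set and node_set < plant_set:
--                 node_set.discard(first)
--                 used_tuples.add(start_node)
--                 modified = True
--
--     # Remove used tuples from group_start_nodes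
--     group_start_nodes -= used_tuples
--
--     return modified
-- ===== SOURCE B (Python) =====
-- def _update_grouped_nodes(grouped_nodes, group_start_nodes, plant_set):
--     # Return-value equivalent of A: A reports True iff some start pair lies in
--     # some group that is a proper subset of plant_set (A's in-place mutations
--     # cannot affect the flag before it is first set).  Build an inverted index
--     # element -> indices of candidate groups once, then test each pair by
--     # intersecting two index sets.  (A's in-place mutation of grouped_nodes /
--     # group_start_nodes is NOT reproduced.)
--     member_of = {}
--     for idx, node_set in enumerate(grouped_nodes.values()):
--         if node_set < plant_set:
--             for elem in node_set:
--                 member_of.setdefault(elem, set()).add(idx)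
--     empty = set()
--     return any(not member_of.get(first, empty).isdisjoint(member_of.get(second, empty))
--                for first, second in group_start_nodes)
-- ===== Notes on version B (the rewrite author's own statement) =====
-- stated objective: faster
-- what changed: Replaces the S*G nested scan (with in-place mutation) by a one-pass inverted index element->candidate-group indices, answering each start pair by a set intersection; return value only, A's mutation of its arguments is not reproduced.
import Mathlib
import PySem

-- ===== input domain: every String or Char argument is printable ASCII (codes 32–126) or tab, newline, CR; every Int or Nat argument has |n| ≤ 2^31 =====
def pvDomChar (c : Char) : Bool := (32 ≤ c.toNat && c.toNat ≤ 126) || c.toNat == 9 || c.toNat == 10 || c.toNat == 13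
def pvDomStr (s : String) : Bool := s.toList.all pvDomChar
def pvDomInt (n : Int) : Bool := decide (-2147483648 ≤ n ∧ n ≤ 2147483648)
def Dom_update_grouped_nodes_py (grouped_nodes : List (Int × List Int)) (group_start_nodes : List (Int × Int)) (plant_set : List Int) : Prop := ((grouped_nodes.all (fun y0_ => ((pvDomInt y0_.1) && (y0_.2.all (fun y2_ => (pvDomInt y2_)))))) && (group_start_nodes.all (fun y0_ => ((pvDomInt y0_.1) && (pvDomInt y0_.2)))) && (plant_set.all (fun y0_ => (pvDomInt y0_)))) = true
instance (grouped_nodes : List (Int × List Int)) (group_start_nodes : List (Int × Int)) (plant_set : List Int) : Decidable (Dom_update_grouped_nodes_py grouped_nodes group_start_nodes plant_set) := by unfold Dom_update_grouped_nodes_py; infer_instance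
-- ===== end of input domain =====

-- B replaces A's nested scan by a one-pass inverted index (element -> candidate group
-- indices) and per-pair set intersection; equivalence is about the RETURN value only —
-- A's in-place mutation of grouped_nodes / group_start_nodes is not reproduced by B.

-- ===== PORT A =====
-- Python 'ns < plant_set' on sets: subset and not equal (as sets).
def pvLt (a b : List Int) : Bool :=
  PySem.Set.issubset a b && !(PySem.Set.issubset b a)

-- inner 'for key, node_set in grouped_nodes.items()' loop: returns the (possibly
-- mutated) grouped list and the modified flag.  used_tuples is only consumed by the
-- in-place 'group_start_nodes -= used_tuples', a side effect not modelled here.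
def pvInnerA (first second : Int) (plant : List Int) :
    List (Int × List Int) → Bool → List (Int × List Int) × Bool
  | [], m => ([], m)
  | (k, ns) :: rest, m =>
    if ns.contains first && ns.contains second && pvLt ns plant then
      let r := pvInnerA first second plant rest true
      ((k, PySem.Set.discard ns first) :: r.1, r.2)
    else
      let r := pvInnerA first second plant rest m
      ((k, ns) :: r.1, r.2)

-- outer 'for start_node in group_start_nodes' loop, threading the mutated dict state
def pvOuterA (plant : List Int) :
    List (Int × Int) → List (Int × List Int) → Bool → Bool
  | [], _, m => m
  | (f, s) :: rest, g, m =>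
    let r := pvInnerA f s plant g m
    pvOuterA plant rest r.1 r.2

def update_grouped_nodes_py (grouped_nodes : List (Int × List Int)) (group_start_nodes : List (Int × Int)) (plant_set : List Int) : Bool :=
  pvOuterA plant_set group_start_nodes grouped_nodes false

-- ===== PORT B =====
-- Python 'node_set < plant_set' in B
def pvLtB (a b : List Int) : Bool :=
  PySem.Set.issubset a b && !(PySem.Set.issubset b a)

-- member_of: element -> set of indices of proper-subset groups containing it
def pvBuildIndex (plant : List Int) (gn : List (Int × List Int)) :
    PySem.Dict Int (PySem.Set Int) :=
  (PySem.List.enumerate (gn.map (·.2))).foldl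
    (fun d p =>
      if pvLtB p.2 plant then
        p.2.foldl (fun d e => d.modify e PySem.Set.empty (fun s => PySem.Set.add s p.1)) d
      else d)
    PySem.Dict.empty

def update_grouped_nodes_py_alt (grouped_nodes : List (Int × List Int)) (group_start_nodes : List (Int × Int)) (plant_set : List Int) : Bool :=
  let member_of := pvBuildIndex plant_set grouped_nodes
  group_start_nodes.any (fun p =>
    !(PySem.Set.isdisjoint (member_of.getD p.1 PySem.Set.empty)
                           (member_of.getD p.2 PySem.Set.empty)))

-- ===== PRECONDITION & SPEC =====
def Spec_update_grouped_nodes_py (grouped_nodes : List (Int × List Int)) (group_start_nodes : List (Int × Int)) (plant_set : List Int) (out : Bool) : Prop := out = update_grouped_nodes_py_alt grouped_nodes group_start_nodes plant_set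
instance (grouped_nodes : List (Int × List Int)) (group_start_nodes : List (Int × Int)) (plant_set : List Int) (out : Bool) : Decidable (Spec_update_grouped_nodes_py grouped_nodes group_start_nodes plant_set out) := by unfold Spec_update_grouped_nodes_py; infer_instance

-- ===== CLAIM (what is proved, stated in full; the proofs are below) =====
def Claim_equal_update_grouped_nodes_py : Prop := ∀ (grouped_nodes : List (Int × List Int)) (group_start_nodes : List (Int × Int)) (plant_set : List Int), Dom_update_grouped_nodes_py grouped_nodes group_start_nodes plant_set → Spec_update_grouped_nodes_py grouped_nodes group_start_nodes plant_set (update_grouped_nodes_py grouped_nodes group_start_nodes plant_set)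

-- ===== LEMMAS AND PROOFS =====

lemma pvLt_eq_pvLtB : pvLt = pvLtB := rfl


-- the common specification: some pair lies (both components) in some group that is a
-- proper subset of plant
def pvMatch (f s : Int) (plant ns : List Int) : Bool :=
  ns.contains f && ns.contains s && pvLt ns plant

lemma pvInnerA_snd (f s : Int) (plant : List Int) (g : List (Int × List Int)) (m : Bool) :
    (pvInnerA f s plant g m).2 = (m || g.any (fun kv => pvMatch f s plant kv.2)) := by
  induction g generalizing m with
  | nil => simp [pvInnerA]
  | cons kv rest ih =>
    obtain ⟨k, ns⟩ := kv
    cases h : (ns.contains f && ns.contains s && pvLt ns plant) with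
    | true =>
      simp only [Bool.and_eq_true, List.contains_eq_mem, decide_eq_true_eq] at h
      simp [pvInnerA, pvMatch, h.1.1, h.1.2, h.2, ih]
    | false =>
      simp only [Bool.and_eq_true, List.contains_eq_mem, Bool.and_eq_false_iff,
        decide_eq_false_iff_not, Bool.not_eq_true] at h
      simp [pvInnerA, pvMatch, ih]
      cases h with
      | inl h' => cases h' <;> simp_all
      | inr h' => simp_all

lemma pvInnerA_no_match (f s : Int) (plant : List Int) (g : List (Int × List Int)) (m : Bool)
    (h : g.any (fun kv => pvMatch f s plant kv.2) = false) :
    pvInnerA f s plant g m = (g, m) := by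
  induction g with
  | nil => simp [pvInnerA]
  | cons kv rest ih =>
    obtain ⟨k, ns⟩ := kv
    simp only [List.any_cons, Bool.or_eq_false_iff, pvMatch] at h
    obtain ⟨h1, h2⟩ := h
    simp only [pvInnerA, h1, Bool.false_eq_true, if_false, ih h2]

lemma pvOuterA_true (plant : List Int) (ps : List (Int × Int)) (g : List (Int × List Int)) :
    pvOuterA plant ps g true = true := by
  induction ps generalizing g with
  | nil => simp [pvOuterA]
  | cons p rest ih =>
    obtain ⟨f, s⟩ := p
    simp only [pvOuterA, pvInnerA_snd]
    simp [ih]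

lemma pvOuterA_spec (plant : List Int) (ps : List (Int × Int)) (g : List (Int × List Int)) :
    pvOuterA plant ps g false
      = ps.any (fun p => g.any (fun kv => pvMatch p.1 p.2 plant kv.2)) := by
  induction ps with
  | nil => simp [pvOuterA]
  | cons p rest ih =>
    obtain ⟨f, s⟩ := p
    by_cases h : g.any (fun kv => pvMatch f s plant kv.2) = true
    · simp only [pvOuterA, pvInnerA_snd, h, Bool.false_or, pvOuterA_true, List.any_cons]
      simp [h]
    · have h' : g.any (fun kv => pvMatch f s plant kv.2) = false := by
        simpa using h
      simp only [pvOuterA, pvInnerA_no_match f s plant g false h', List.any_cons, h',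
        Bool.false_or]
      exact ih

-- B-side: membership in the inverted index

lemma pvIndexInner_mem (i : Int) (es : List Int) (d : PySem.Dict Int (PySem.Set Int))
    (e : Int) (x : Int) :
    x ∈ (es.foldl (fun d e => d.modify e PySem.Set.empty (fun s => PySem.Set.add s i)) d).getD e PySem.Set.empty
      ↔ x ∈ d.getD e PySem.Set.empty ∨ (x = i ∧ e ∈ es) := by
  induction es generalizing d with
  | nil => simp
  | cons a rest ih =>
    simp only [List.foldl_cons, ih, PySem.Dict.getD_modify]
    by_cases h : e = a
    · subst h
      simp [PySem.Set.mem_add]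
      tauto
    · simp [h]

lemma pvBuildIndex_mem (plant : List Int) (l : List (Int × List Int))
    (d : PySem.Dict Int (PySem.Set Int)) (e x : Int) :
    x ∈ (l.foldl
        (fun d p =>
          if pvLtB p.2 plant then
            p.2.foldl (fun d e => d.modify e PySem.Set.empty (fun s => PySem.Set.add s p.1)) d
          else d)
        d).getD e PySem.Set.empty
      ↔ x ∈ d.getD e PySem.Set.empty
        ∨ ∃ p ∈ l, x = p.1 ∧ e ∈ p.2 ∧ pvLtB p.2 plant = true := by
  induction l generalizing d with
  | nil => simp
  | cons p rest ih =>
    by_cases h : pvLtB p.2 plant = true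
    · simp only [List.foldl_cons, h, if_true, ih, pvIndexInner_mem, List.mem_cons]
      constructor
      · rintro (((hx) | ⟨rfl, he⟩) | ⟨q, hq, rfl, he, hs⟩)
        · exact Or.inl hx
        · exact Or.inr ⟨p, Or.inl rfl, rfl, he, h⟩
        · exact Or.inr ⟨q, Or.inr hq, rfl, he, hs⟩
      · rintro (hx | ⟨q, (rfl | hq), rfl, he, hs⟩)
        · exact Or.inl (Or.inl hx)
        · exact Or.inl (Or.inr ⟨rfl, he⟩)
        · exact Or.inr ⟨q, hq, rfl, he, hs⟩
    · simp only [List.foldl_cons, h, if_false, Bool.false_eq_true, ih, List.mem_cons]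
      constructor
      · rintro (hx | ⟨q, hq, rfl, he, hs⟩)
        · exact Or.inl hx
        · exact Or.inr ⟨q, Or.inr hq, rfl, he, hs⟩
      · rintro (hx | ⟨q, (rfl | hq), rfl, he, hs⟩)
        · exact Or.inl hx
        · exact (h hs).elim
        · exact Or.inr ⟨q, hq, rfl, he, hs⟩

lemma pvBuildIndex_getD_mem (plant : List Int) (gn : List (Int × List Int)) (e x : Int) :
    x ∈ (pvBuildIndex plant gn).getD e PySem.Set.empty
      ↔ ∃ p ∈ PySem.List.enumerate (gn.map (·.2)) 0,
          x = p.1 ∧ e ∈ p.2 ∧ pvLtB p.2 plant = true := by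
  unfold pvBuildIndex
  rw [pvBuildIndex_mem]
  have hemp : (PySem.Dict.empty : PySem.Dict Int (PySem.Set Int)).getD e PySem.Set.empty
      = PySem.Set.empty := rfl
  rw [hemp]
  simp [PySem.Set.empty]

lemma pvAlt_pair (plant : List Int) (gn : List (Int × List Int)) (f s : Int) :
    (!(PySem.Set.isdisjoint ((pvBuildIndex plant gn).getD f PySem.Set.empty)
        ((pvBuildIndex plant gn).getD s PySem.Set.empty))) = true
      ↔ ∃ kv ∈ gn, pvMatch f s plant kv.2 = true := by
  rw [Bool.not_eq_eq_eq_not, Bool.not_true, ← Bool.not_eq_true,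
    PySem.Set.isdisjoint_iff]
  push_neg
  constructor
  · rintro ⟨x, hxf, hxs⟩
    rw [pvBuildIndex_getD_mem] at hxf hxs
    obtain ⟨p, hp, rfl, hf, hsub⟩ := hxf
    obtain ⟨q, hq, hpq, hs, _⟩ := hxs
    -- the shared index forces the same enumerated entry
    rw [PySem.List.mem_enumerate_iff] at hp hq
    obtain ⟨kp, hkp, rfl⟩ := hp
    obtain ⟨kq, hkq, rfl⟩ := hq
    have : kp = kq := by
      have := hpq
      simp at this
      omega
    subst this
    simp only at hf hs
    have hmem : (gn.map (·.2))[kp] ∈ gn.map (·.2) := List.getElem_mem _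
    rw [List.mem_map] at hmem
    obtain ⟨kv, hkv, hval⟩ := hmem
    refine ⟨kv, hkv, ?_⟩
    unfold pvMatch
    rw [hval]
    simp only [Bool.and_eq_true, List.contains_eq_mem, decide_eq_true_iff]
    exact ⟨⟨hf, hs⟩, by rw [pvLt_eq_pvLtB]; exact hsub⟩
  · rintro ⟨kv, hkv, hm⟩
    unfold pvMatch at hm
    simp only [Bool.and_eq_true, List.contains_eq_mem, decide_eq_true_iff] at hm
    obtain ⟨⟨hf, hs⟩, hsub⟩ := hm
    rw [pvLt_eq_pvLtB] at hsub
    obtain ⟨k, hk, hval⟩ := List.mem_iff_getElem.mp (List.mem_map_of_mem hkv (f := (·.2)))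
    refine ⟨(k : Int), ?_, ?_⟩
    · rw [pvBuildIndex_getD_mem]
      refine ⟨((k : Int), (gn.map (·.2))[k]), ?_, by simp, by rw [hval]; exact hf, by rw [hval]; exact hsub⟩
      rw [PySem.List.mem_enumerate_iff]
      exact ⟨k, hk, by simp⟩
    · rw [pvBuildIndex_getD_mem]
      refine ⟨((k : Int), (gn.map (·.2))[k]), ?_, by simp, by rw [hval]; exact hs, by rw [hval]; exact hsub⟩
      rw [PySem.List.mem_enumerate_iff]
      exact ⟨k, hk, by simp⟩

-- ===== VERDICT (by name: the statement is the Claim_ definition above) =====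
theorem update_grouped_nodes_py_spec : Claim_equal_update_grouped_nodes_py := by
  intro gn gsn plant _
  unfold Spec_update_grouped_nodes_py update_grouped_nodes_py update_grouped_nodes_py_alt
  rw [pvOuterA_spec]
  rw [Bool.eq_iff_iff]
  simp only [List.any_eq_true]
  constructor
  · rintro ⟨p, hp, hg⟩
    have hg' : ∃ kv ∈ gn, pvMatch p.1 p.2 plant kv.2 = true := by
      simpa [pvMatch] using hg
    obtain ⟨kv, hkv, hm⟩ := hg'
    exact ⟨p, hp, (pvAlt_pair plant gn p.1 p.2).mpr ⟨kv, hkv, hm⟩⟩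
  · rintro ⟨p, hp, hd⟩
    obtain ⟨kv, hkv, hm⟩ := (pvAlt_pair plant gn p.1 p.2).mp hd
    refine ⟨p, hp, ?_⟩
    have hany : gn.any (fun kv => pvMatch p.1 p.2 plant kv.2) = true :=
      List.any_eq_true.mpr ⟨kv, hkv, hm⟩
    simpa [pvMatch] using hany
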